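-- pv_equiv track=rewrite | github.com/JinJung0101/algorithm | 테스트연습/백준/19941.py | distribute_burgers
-- ===== SOURCE A (Python) =====
-- def distribute_burgers(line, k):
--     n = len(line)
--     burgers = [i for i in range(n) if line[i] == 'H']
--     people = [i for i in range(n) if line[i] == 'P']
--     used = [False] * len(burgers)
--     count = 0
--
--     for person in people:
--         for i in range(len(burgers)):
--             if not used[i] and abs(burgers[i] - person) <= k:
--                 used[i] = True
--                 count += 1
--                 break
--
--     return count
-- ===== SOURCE B (Python) =====
-- def distribute_burgers(line, k):
--     burgers = [i for i, c in enumerate(line) if c == 'H']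
--     people = [i for i, c in enumerate(line) if c == 'P']
--     j = 0
--     count = 0
--     for p in people:
--         while j < len(burgers) and burgers[j] < p - k:
--             j += 1
--         if j < len(burgers) and burgers[j] <= p + k:
--             count += 1
--             j += 1
--     return count
-- ===== Notes on version B (the rewrite author's own statement) =====
-- stated objective: alternative
-- what changed: Replaced the per-person linear scan over a used[] array by a single two-pointer sweep over the sorted burger/people index lists; it trades A's mutable used[] bookkeeping for a monotone pointer.
import Mathlib
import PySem

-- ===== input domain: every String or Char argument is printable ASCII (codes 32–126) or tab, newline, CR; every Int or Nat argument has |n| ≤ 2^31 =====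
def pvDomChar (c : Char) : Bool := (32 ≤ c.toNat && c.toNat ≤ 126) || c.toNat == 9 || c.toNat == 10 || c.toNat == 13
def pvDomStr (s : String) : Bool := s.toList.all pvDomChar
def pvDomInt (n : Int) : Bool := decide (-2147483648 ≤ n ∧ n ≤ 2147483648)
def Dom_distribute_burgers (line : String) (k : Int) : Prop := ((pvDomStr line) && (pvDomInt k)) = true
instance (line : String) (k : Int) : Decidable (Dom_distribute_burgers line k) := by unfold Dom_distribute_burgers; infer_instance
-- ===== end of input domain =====

-- B replaces A's per-person scan over a used[] array by a two-pointer sweep over the sorted index lists (alternative algorithm, same results).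


-- ===== PORT A =====
-- A's inner loop: first unused burger within distance k; returns the updated used list if one was taken.
def pvAPick (burgers : List Int) (used : List Bool) (p k : Int) : Option (List Bool) :=
  match burgers, used with
  | b :: bs, u :: us =>
    if u = false ∧ |b - p| ≤ k then some (true :: us)
    else (pvAPick bs us p k).map (u :: ·)
  | _, _ => none

def pvALoop (people : List Int) (burgers : List Int) (used : List Bool) (count k : Int) : Int :=
  match people with
  | [] => count
  | p :: ps =>
    match pvAPick burgers used p k with
    | some used' => pvALoop ps burgers used' (count + 1) k
    | none => pvALoop ps burgers used count k

def distribute_burgers (line : String) (k : Int) : Int :=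
  let n : Int := PySem.Str.len line
  let burgers := (PySem.List.pyRange 0 n 1).filter (fun i => PySem.Str.pyGet? line i == some 'H')
  let people := (PySem.List.pyRange 0 n 1).filter (fun i => PySem.Str.pyGet? line i == some 'P')
  let used := List.replicate burgers.length false
  pvALoop people burgers used 0 k

-- ===== PORT B =====
-- B's inner while: advance the burger pointer past burgers below p - k (pointer = remaining suffix).
def pvBSkip (bs : List Int) (p k : Int) : List Int :=
  match bs with
  | [] => []
  | b :: rest => if b < p - k then pvBSkip rest p k else b :: rest

def pvBLoop (people : List Int) (bs : List Int) (count k : Int) : Int :=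
  match people with
  | [] => count
  | p :: ps =>
    match pvBSkip bs p k with
    | b :: rest => if b ≤ p + k then pvBLoop ps rest (count + 1) k else pvBLoop ps (b :: rest) count k
    | [] => pvBLoop ps [] count k

def distribute_burgers_alt (line : String) (k : Int) : Int :=
  let burgers := (PySem.List.enumerate line.toList).filterMap (fun ic => if ic.2 == 'H' then some ic.1 else none)
  let people := (PySem.List.enumerate line.toList).filterMap (fun ic => if ic.2 == 'P' then some ic.1 else none)
  pvBLoop people burgers 0 k

-- ===== PRECONDITION & SPEC =====
def Spec_distribute_burgers (line : String) (k : Int) (out : Int) : Prop := out = distribute_burgers_alt line k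
instance (line : String) (k : Int) (out : Int) : Decidable (Spec_distribute_burgers line k out) := by unfold Spec_distribute_burgers; infer_instance

-- ===== CLAIM (what is proved, stated in full; the proofs are below) =====
def Claim_equal_distribute_burgers : Prop := ∀ (line : String) (k : Int), Dom_distribute_burgers line k → Spec_distribute_burgers line k (distribute_burgers line k)

-- ===== LEMMAS AND PROOFS =====

-- A's loop re-expressed on the zipped (burger, used) list, to state the invariant.
def pvZPick (zs : List (Int × Bool)) (p k : Int) : Option (List (Int × Bool)) :=
  match zs with
  | (b, u) :: rest =>
    if u = false ∧ |b - p| ≤ k then some ((b, true) :: rest)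
    else (pvZPick rest p k).map ((b, u) :: ·)
  | [] => none

def pvZLoop (people : List Int) (zs : List (Int × Bool)) (count k : Int) : Int :=
  match people with
  | [] => count
  | p :: ps =>
    match pvZPick zs p k with
    | some zs' => pvZLoop ps zs' (count + 1) k
    | none => pvZLoop ps zs count k

lemma zpick_eq_apick (p k : Int) : ∀ (bs : List Int) (us : List Bool), bs.length = us.length →
    pvZPick (bs.zip us) p k = (pvAPick bs us p k).map (bs.zip ·) := by
  intro bs
  induction bs with
  | nil => intro us h; cases us <;> simp_all [pvZPick, pvAPick]
  | cons b bs ih =>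
    intro us h
    cases us with
    | nil => simp at h
    | cons u us =>
      simp only [List.zip_cons_cons, pvZPick, pvAPick]
      split_ifs with hc
      · rfl
      · rw [ih us (by simpa using h)]
        cases hA : pvAPick bs us p k <;> simp

lemma apick_length (p k : Int) : ∀ (bs : List Int) (us us' : List Bool),
    pvAPick bs us p k = some us' → us'.length = us.length := by
  intro bs
  induction bs with
  | nil => intro us us' h; simp [pvAPick] at h
  | cons b bs ih =>
    intro us us' h
    cases us with
    | nil => simp [pvAPick] at h
    | cons u us =>
      simp only [pvAPick] at h
      split_ifs at h with hc
      · cases h; simp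
      · obtain ⟨w, hw, rfl⟩ := Option.map_eq_some_iff.mp h
        simp [ih us w hw]

lemma zloop_eq_aloop (k : Int) : ∀ (people bs : List Int) (us : List Bool) (count : Int),
    bs.length = us.length →
    pvZLoop people (bs.zip us) count k = pvALoop people bs us count k := by
  intro people
  induction people with
  | nil => intro bs us count h; rfl
  | cons p ps ih =>
    intro bs us count h
    simp only [pvZLoop, pvALoop, zpick_eq_apick p k bs us h]
    cases hA : pvAPick bs us p k with
    | none => exact ih bs us count h
    | some us' => exact ih bs us' (count + 1) (h.trans (apick_length p k bs us us' hA).symm)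

lemma zip_replicate_false : ∀ (bs : List Int), bs.zip (List.replicate bs.length false) = bs.map (fun b => (b, false)) := by
  intro bs
  induction bs with
  | nil => rfl
  | cons b bs ih => simp [List.replicate_succ, ih]

lemma bskip_split (p k : Int) : ∀ (live : List Int),
    ∃ sk, live = sk ++ pvBSkip live p k ∧ ∀ b ∈ sk, b < p - k := by
  intro live
  induction live with
  | nil => exact ⟨[], rfl, by simp⟩
  | cons b rest ih =>
    by_cases hb : b < p - k
    · obtain ⟨sk, h1, h2⟩ := ih
      refine ⟨b :: sk, ?_, ?_⟩
      · simpa [pvBSkip, hb] using h1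
      · intro x hx
        rcases List.mem_cons.mp hx with rfl | hx
        · exact hb
        · exact h2 x hx
    · exact ⟨[], by simp [pvBSkip, hb], by simp⟩

lemma bskip_head (p k : Int) : ∀ (live : List Int) b rest, pvBSkip live p k = b :: rest → p - k ≤ b := by
  intro live
  induction live with
  | nil => intro b rest h; simp [pvBSkip] at h
  | cons x xs ih =>
    intro b rest h
    by_cases hx : x < p - k
    · exact ih b rest (by simpa [pvBSkip, hx] using h)
    · simp [pvBSkip, hx] at h
      omega

lemma zpick_none (p k : Int) : ∀ (zs : List (Int × Bool)),
    (∀ x ∈ zs, x.2 = false → ¬ |x.1 - p| ≤ k) → pvZPick zs p k = none := by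
  intro zs
  induction zs with
  | nil => intro _; rfl
  | cons x rest ih =>
    intro h
    obtain ⟨b, u⟩ := x
    simp only [pvZPick]
    rw [if_neg, ih (fun y hy => h y (List.mem_cons_of_mem _ hy))]
    · rfl
    · rintro ⟨rfl, habs⟩
      exact h (b, false) (List.mem_cons_self ..) rfl habs

lemma zpick_some (p k b : Int) (post : List (Int × Bool)) (hb : |b - p| ≤ k) :
    ∀ (pre : List (Int × Bool)), (∀ x ∈ pre, x.2 = false → ¬ |x.1 - p| ≤ k) →
    pvZPick (pre ++ (b, false) :: post) p k = some (pre ++ (b, true) :: post) := by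
  intro pre
  induction pre with
  | nil => intro _; simp [pvZPick, hb]
  | cons x pre ih =>
    intro h
    obtain ⟨c, u⟩ := x
    simp only [List.cons_append, pvZPick]
    rw [if_neg, ih (fun y hy => h y (List.mem_cons_of_mem _ hy))]
    · rfl
    · rintro ⟨rfl, habs⟩
      exact h (c, false) (List.mem_cons_self ..) rfl habs

lemma core (k : Int) : ∀ (people : List Int) (dead : List (Int × Bool)) (live : List Int) (count : Int),
    people.Pairwise (· ≤ ·) →
    (dead.map Prod.fst ++ live).Pairwise (· < ·) →
    (∀ x ∈ dead, x.2 = false → ∀ p ∈ people, x.1 < p - k) →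
    pvZLoop people (dead ++ live.map (fun b => (b, false))) count k = pvBLoop people live count k := by
  intro people
  induction people with
  | nil => intros; rfl
  | cons p ps ih =>
    intro dead live count hp hs hd
    obtain ⟨hp1, hp2⟩ := List.pairwise_cons.mp hp
    obtain ⟨sk, hsplit, hsk⟩ := bskip_split p k live
    set rem := pvBSkip live p k with hremdef
    have hdeadp : ∀ x ∈ dead, x.2 = false → ¬ |x.1 - p| ≤ k := by
      intro x hx hu habs
      have h1 := hd x hx hu p (List.mem_cons_self ..)
      have h2 := abs_le.mp habs
      omega
    have hpre : ∀ x ∈ dead ++ sk.map (fun b => (b, false)), x.2 = false → ¬ |x.1 - p| ≤ k := by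
      intro x hx hu habs
      rcases List.mem_append.mp hx with h | h
      · exact hdeadp x h hu habs
      · obtain ⟨b', hb', rfl⟩ := List.mem_map.mp h
        have h1 := hsk b' hb'
        have h2 := abs_le.mp habs
        simp only at h2
        omega
    have hzs : dead ++ live.map (fun b => (b, false))
        = (dead ++ sk.map (fun b => (b, false))) ++ rem.map (fun b => (b, false)) := by
      rw [hsplit]; simp [List.map_append, List.append_assoc]
    have hdlive : dead.map Prod.fst ++ live = (dead.map Prod.fst ++ sk) ++ rem := by
      rw [hsplit]; simp [List.append_assoc]
    have hd' : ∀ x ∈ dead ++ sk.map (fun b => (b, false)), x.2 = false → ∀ p' ∈ ps, x.1 < p' - k := by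
      intro x hx hu p' hp'
      rcases List.mem_append.mp hx with h | h
      · exact hd x h hu p' (List.mem_cons_of_mem _ hp')
      · obtain ⟨b', hb', rfl⟩ := List.mem_map.mp h
        have := hsk b' hb'
        have := hp1 p' hp'
        simp only
        omega
    cases hrem : rem with
    | nil =>
      -- no burger left at or above p - k: A picks nothing either
      have hnone : pvZPick (dead ++ live.map (fun b => (b, false))) p k = none := by
        apply zpick_none
        rw [hzs, hrem]
        simpa using hpre
      simp only [pvZLoop, pvBLoop, ← hremdef, hrem, hnone]
      have := ih (dead ++ sk.map (fun b => (b, false))) [] count hp2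
        (by
          rw [List.map_append, List.map_map]
          have h2 := hs
          rw [hdlive, hrem] at h2
          simpa [List.append_assoc, Function.comp_def] using h2)
        hd'
      simpa [hzs, hrem] using this
    | cons b rest =>
      have hbge : p - k ≤ b := bskip_head p k live b rest (hremdef ▸ hrem)
      have hlive_pw : (b :: rest).Pairwise (· < ·) := by
        have h2 := hs
        rw [hdlive, hrem] at h2
        exact h2.sublist (List.sublist_append_right _ _)
      by_cases hble : b ≤ p + k
      · -- both take burger b
        have habs : |b - p| ≤ k := abs_le.mpr ⟨by omega, by omega⟩
        have hsome : pvZPick (dead ++ live.map (fun b => (b, false))) p k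
            = some ((dead ++ sk.map (fun b => (b, false))) ++ (b, true) :: rest.map (fun b => (b, false))) := by
          rw [hzs, hrem, List.map_cons]
          exact zpick_some p k b _ habs _ hpre
        simp only [pvZLoop, pvBLoop, ← hremdef, hrem, hsome, if_pos hble]
        have := ih ((dead ++ sk.map (fun b => (b, false))) ++ [(b, true)]) rest (count + 1) hp2
          (by
            rw [List.map_append, List.map_append, List.map_map]
            have h2 := hs
            rw [hdlive, hrem] at h2
            simpa [List.append_assoc, Function.comp_def] using h2)
          (by
            intro x hx hu p' hp'
            rcases List.mem_append.mp hx with h | h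
            · exact hd' x h hu p' hp'
            · rw [List.mem_singleton] at h
              rw [h] at hu
              simp at hu)
        simpa [List.append_assoc] using this
      · -- b is already beyond p + k: A picks nothing
        have hnone : pvZPick (dead ++ live.map (fun b => (b, false))) p k = none := by
          apply zpick_none
          rw [hzs, hrem]
          intro x hx hu habs
          rcases List.mem_append.mp hx with h | h
          · exact hpre x h hu habs
          · obtain ⟨b', hb', rfl⟩ := List.mem_map.mp h
            have hbb' : b ≤ b' := by
              rcases List.mem_cons.mp hb' with rfl | hb''
              · exact le_rfl
              · exact le_of_lt (List.rel_of_pairwise_cons hlive_pw hb'')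
            have h2 := abs_le.mp habs
            simp only at h2
            omega
        simp only [pvZLoop, pvBLoop, ← hremdef, hrem, hnone, if_neg hble]
        have := ih (dead ++ sk.map (fun b => (b, false))) (b :: rest) count hp2
          (by
            rw [List.map_append, List.map_map]
            have h2 := hs
            rw [hdlive, hrem] at h2
            simpa [List.append_assoc, Function.comp_def] using h2)
          hd'
        simpa [hzs, hrem, List.append_assoc] using this

lemma lists_eq (line : String) (c : Char) :
    (PySem.List.pyRange 0 (PySem.Str.len line) 1).filter (fun i => PySem.Str.pyGet? line i == some c)
      = (PySem.List.enumerate line.toList).filterMap (fun ic => if ic.2 == c then some ic.1 else none) := by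
  rw [PySem.List.enumerate_eq_map_pyRange line.toList ' ', List.filterMap_map]
  have hfil : ∀ (p : Int → Bool) (l : List Int), l.filterMap (fun a => if p a then some a else none) = l.filter p := by
    intro p l
    induction l with
    | nil => rfl
    | cons a l ih => by_cases h : p a <;> simp [h, ih]
  have hcomp : (fun i : Int => (if PySem.List.pyGetD line.toList i ' ' == c then some i else none)) =
      (fun ic : Int × Char => if ic.2 == c then some ic.1 else none)
        ∘ (fun j => (j, PySem.List.pyGetD line.toList j ' ')) := rfl
  rw [← hcomp, hfil]
  apply List.filter_congr
  intro i hi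
  obtain ⟨h0, h1⟩ := PySem.List.mem_pyRange_one.mp hi
  have hl : i < (line.toList.length : Int) := by simpa [PySem.Str.len_eq] using h1
  have hn : i.toNat < line.toList.length := by omega
  rw [PySem.Str.pyGet?, PySem.Chars.pyGet?, PySem.List.pyGet?_of_nonneg _ h0,
      PySem.List.pyGetD_eq_getElem _ _ h0 hl, List.getElem?_eq_getElem hn]
  simp

lemma lists_sorted (line : String) (c : Char) :
    ((PySem.List.enumerate line.toList).filterMap (fun ic => if ic.2 == c then some ic.1 else none)).Pairwise (· < ·) := by
  rw [List.pairwise_filterMap]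
  refine (PySem.List.pairwise_lt_enumerate line.toList 0).imp ?_
  intro a b hab x hx y hy
  by_cases h1 : a.2 == c <;> simp [h1] at hx
  by_cases h2 : b.2 == c <;> simp [h2] at hy
  omega

-- ===== VERDICT (by name: the statement is the Claim_ definition above) =====
theorem distribute_burgers_spec : Claim_equal_distribute_burgers := by
  intro line k _
  show distribute_burgers line k = distribute_burgers_alt line k
  simp only [distribute_burgers, distribute_burgers_alt]
  rw [lists_eq line 'H', lists_eq line 'P']
  set burgers := (PySem.List.enumerate line.toList).filterMap (fun ic => if ic.2 == 'H' then some ic.1 else none) with hB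
  set people := (PySem.List.enumerate line.toList).filterMap (fun ic => if ic.2 == 'P' then some ic.1 else none) with hP
  rw [← zloop_eq_aloop k people burgers (List.replicate burgers.length false) 0 (by simp),
      zip_replicate_false]
  exact core k people [] burgers 0 ((lists_sorted line 'P').imp le_of_lt)
    (lists_sorted line 'H') (by simp)
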